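-- pv_equiv track=rewrite | github.com/HadrielTzuk/tip-marketplace | Integrations/GoogleSecurityCommandCenter/Managers/datamodels.py | update_resource_owners
-- ===== SOURCE A (Python) =====
-- def update_resource_owners(data):
--     resource_owners = {}
--     for owner in data:
--         key, value = owner.split(':')
--         if not resource_owners.get(key):
--             resource_owners[key] = []
--         resource_owners[key].append(value)
--
--     return resource_owners
-- ===== SOURCE B (Python) =====
-- def update_resource_owners(data):
--     pairs = []
--     for owner in data:
--         key, value = owner.split(':')
--         pairs.append((key, value))
--     keys = list(dict.fromkeys(key for key, _ in pairs))
--     return {k: [v for kk, v in pairs if kk == k] for k in keys}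
-- ===== Notes on version B (the rewrite author's own statement) =====
-- stated objective: alternative
-- what changed: Replaces incremental dict accumulation with a two-pass scheme: first parse all owners into (key, value) pairs, then compute the distinct keys in first-occurrence order and build each group by filtering the pair list per key.
-- outside the precondition, e.g. on update_resource_owners(['a']): A raises ValueError, B raises ValueError
import Mathlib
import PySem

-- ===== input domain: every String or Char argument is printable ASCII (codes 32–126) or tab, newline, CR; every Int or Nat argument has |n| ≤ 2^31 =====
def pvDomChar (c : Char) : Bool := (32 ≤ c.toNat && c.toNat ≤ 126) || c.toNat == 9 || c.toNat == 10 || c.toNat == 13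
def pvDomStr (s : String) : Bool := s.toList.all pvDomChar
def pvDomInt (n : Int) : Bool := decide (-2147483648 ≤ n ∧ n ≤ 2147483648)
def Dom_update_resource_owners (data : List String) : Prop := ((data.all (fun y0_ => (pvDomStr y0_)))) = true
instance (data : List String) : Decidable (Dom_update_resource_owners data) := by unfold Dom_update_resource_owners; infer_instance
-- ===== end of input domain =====

-- B replaces A's incremental dict accumulation by a two-pass scheme (parse all pairs,
-- then dedup keys and filter per key); same result, no speed claim.


-- ===== PORT A =====
-- for owner in data: key, value = owner.split(':'); if not d.get(key): d[key] = []; d[key].append(value)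
def update_resource_owners (data : List String) : List (String × List String) :=
  (data.foldl (fun d owner =>
      match PySem.Str.split? owner ":" with
      | some [key, value] =>
          let d1 := if ((d.get? key).getD []).isEmpty then d.insert key [] else d
          d1.insert key (d1.getD key [] ++ [value])
      | _ => d    -- ValueError (split gives ≠ 2 parts): excluded by Pre_
    ) PySem.Dict.empty).items

-- ===== PORT B =====
def update_resource_owners_alt (data : List String) : List (String × List String) :=
  let pairs := data.foldl (fun ps owner =>
      let parts := (PySem.Str.split? owner ":").getD []
      -- 'key, value = …' unpack: succeeds iff exactly two parts, else ValueError (excluded by Pre_)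
      if parts.length = 2 then ps ++ [(parts.headD "", (parts.drop 1).headD "")] else ps) []
  let keys := PySem.List.dedup (pairs.map (·.1))
  keys.map (fun k => (k, (pairs.filter (fun p => p.1 == k)).map (·.2)))

-- ===== PRECONDITION & SPEC =====
-- Pre_ excludes inputs where Python A raises ValueError: an owner string that does not
-- split on ':' into exactly two parts.
def Pre_update_resource_owners (data : List String) : Prop :=
  ∀ s ∈ data, ((PySem.Str.split? s ":").getD []).length = 2
instance (data : List String) : Decidable (Pre_update_resource_owners data) := by
  unfold Pre_update_resource_owners; infer_instance
def pvWitness_update_resource_owners : List String := ["a:1", "b:2", "a:3"]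
def Spec_update_resource_owners (data : List String) (out : List (String × List String)) : Prop := out = update_resource_owners_alt data
instance (data : List String) (out : List (String × List String)) : Decidable (Spec_update_resource_owners data out) := by unfold Spec_update_resource_owners; infer_instance

-- ===== CLAIM (what is proved, stated in full; the proofs are below) =====
def Claim_equal_update_resource_owners : Prop := ∀ (data : List String), Dom_update_resource_owners data → Pre_update_resource_owners data → Spec_update_resource_owners data (update_resource_owners data)

-- ===== LEMMAS AND PROOFS =====

/-- the (key, value) pairs contributed by one owner string -/
def pvPairOf (owner : String) : List (String × String) :=
  match PySem.Str.split? owner ":" with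
  | some [key, value] => [(key, value)]
  | _ => []

lemma pairs_eq_flatMap (data : List String) :
    data.foldl (fun ps owner =>
      let parts := (PySem.Str.split? owner ":").getD []
      if parts.length = 2 then ps ++ [(parts.headD "", (parts.drop 1).headD "")] else ps) []
    = data.flatMap pvPairOf := by
  have h : (fun (ps : List (String × String)) owner =>
      let parts := (PySem.Str.split? owner ":").getD []
      if parts.length = 2 then ps ++ [(parts.headD "", (parts.drop 1).headD "")] else ps)
      = fun ps owner => ps ++ pvPairOf owner := by
    funext ps owner
    unfold pvPairOf
    rcases PySem.Str.split? owner ":" with _ | ⟨_ | ⟨k, _ | ⟨v, _ | _⟩⟩⟩ <;> simp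
  rw [h, PySem.List.foldl_append_eq_flatMap, List.nil_append]

/-- A's step equals a plain `modify … (· ++ [v])` when every stored value is nonempty. -/
lemma stepA_eq_modify (d : PySem.Dict String (List String)) (k v : String)
    (h : ∀ q ∈ d.items, q.2 ≠ []) :
    (let d1 := if ((d.get? k).getD []).isEmpty then d.insert k [] else d
     d1.insert k (d1.getD k [] ++ [v])) = d.modify k [] (· ++ [v]) := by
  show _ = d.insert k (d.getD k [] ++ [v])
  cases hg : d.get? k with
  | none =>
      simp only [Option.getD_none, List.isEmpty_nil, if_pos]
      rw [PySem.Dict.getD_insert_self, PySem.Dict.insert_insert_self]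
      simp [PySem.Dict.getD_eq_get?_getD, hg]
  | some l =>
      have hl : l ≠ [] := h (k, l) (PySem.Dict.mem_items_of_get?_eq_some _ hg)
      simp only [Option.getD_some, List.isEmpty_eq_false_iff.mpr hl, if_neg,
        Bool.false_eq_true, not_false_iff]

/-- nonempty-values invariant is preserved by the modify step -/
lemma inv_modify (d : PySem.Dict String (List String)) (k v : String)
    (h : ∀ q ∈ d.items, q.2 ≠ []) :
    ∀ q ∈ (d.modify k [] (· ++ [v])).items, q.2 ≠ [] := by
  intro q hq
  have : q ∈ (d.insert k (d.getD k [] ++ [v])).items := hq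
  rcases (PySem.Dict.mem_items_insert _ _ _ _).mp this with heq | ⟨hm, _⟩
  · subst heq; simp
  · exact h q hm

/-- A's fold over strings equals the modify-fold over the parsed pairs. -/
lemma foldA_eq_foldM (data : List String) (d : PySem.Dict String (List String))
    (h : ∀ q ∈ d.items, q.2 ≠ []) :
    data.foldl (fun d owner =>
      match PySem.Str.split? owner ":" with
      | some [key, value] =>
          let d1 := if ((d.get? key).getD []).isEmpty then d.insert key [] else d
          d1.insert key (d1.getD key [] ++ [value])
      | _ => d) d
    = (data.flatMap pvPairOf).foldl (fun d p => d.modify p.1 [] (· ++ [p.2])) d := by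
  induction data generalizing d with
  | nil => rfl
  | cons owner rest ih =>
      simp only [List.foldl_cons, List.flatMap_cons, List.foldl_append]
      unfold pvPairOf
      rcases hsp : PySem.Str.split? owner ":" with _ | ⟨_ | ⟨k, _ | ⟨v, _ | _⟩⟩⟩ <;>
        simp only [List.foldl_cons, List.foldl_nil] <;>
        first
          | exact ih d h
          | rw [stepA_eq_modify d k v h]; exact ih _ (inv_modify d k v h)

-- ===== VERDICT (by name: the statement is the Claim_ definition above) =====
theorem update_resource_owners_spec : Claim_equal_update_resource_owners := by
  intro data _ _
  show update_resource_owners data = update_resource_owners_alt data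
  unfold update_resource_owners
  simp only [update_resource_owners_alt]
  rw [pairs_eq_flatMap, foldA_eq_foldM data _ (by simp [PySem.Dict.empty])]
  set ps := data.flatMap pvPairOf with hps
  have hnd : ((ps.foldl (fun d p => d.modify p.1 [] (· ++ [p.2])) PySem.Dict.empty)).keys.Nodup :=
    PySem.Dict.nodup_keys_foldl_modify_key ps Prod.fst [] (fun _ p l => l ++ [p.2]) _ (by simp)
  rw [PySem.Dict.items_eq_map_keys _ hnd []]
  rw [PySem.Dict.keys_foldl_modify_key ps Prod.fst [] (fun _ p l => l ++ [p.2])]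
  rw [PySem.List.dedup_eq_ofList]
  have hkeys : PySem.Set.update (PySem.Dict.empty (κ := String) (ν := List String)).keys (ps.map Prod.fst)
      = PySem.Set.ofList (ps.map (·.1)) := by
    simp [PySem.Set.update_nil_left]
  rw [hkeys]
  apply List.map_congr_left
  intro k _
  rw [PySem.Dict.getD_foldl_modify_append]
  simp
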